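-- pv_equiv track=rewrite | github.com/Vrxsh/Python--Functions---Modularity | Final Report.py | classify_grades
-- ===== SOURCE A (Python) =====
-- def classify_grades(averages):
--     classified = {}
--     grade_A = 90
--     grade_B = 75
--     grade_C = 60
--
--     for name, avg in averages.items():
--         if avg >= grade_A:
--             grade = "A"
--         elif avg >= grade_B:
--             grade = "B"
--         elif avg >= grade_C:
--             grade = "C"
--         else:
--             grade = "F"
--         classified[name] = (avg, grade)
--
--     return classified
-- ===== SOURCE B (Python) =====
-- _THRESHOLDS = [60, 75, 90]
-- _LABELS = ["F", "C", "B", "A"]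
--
--
-- def _bisect_right(table, x):
--     lo, hi = 0, len(table)
--     while lo < hi:
--         mid = (lo + hi) // 2
--         if x < table[mid]:
--             hi = mid
--         else:
--             lo = mid + 1
--     return lo
--
--
-- def classify_grades(averages):
--     classified = {}
--     for name, avg in averages.items():
--         classified[name] = (avg, _LABELS[_bisect_right(_THRESHOLDS, avg)])
--     return classified
-- ===== Notes on version B (the rewrite author's own statement) =====
-- stated objective: alternative
-- what changed: Replaces the if/elif comparison chain with a sorted threshold table plus a parallel label list, looked up per entry by a hand-rolled bisect_right binary search.
import Mathlib
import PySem

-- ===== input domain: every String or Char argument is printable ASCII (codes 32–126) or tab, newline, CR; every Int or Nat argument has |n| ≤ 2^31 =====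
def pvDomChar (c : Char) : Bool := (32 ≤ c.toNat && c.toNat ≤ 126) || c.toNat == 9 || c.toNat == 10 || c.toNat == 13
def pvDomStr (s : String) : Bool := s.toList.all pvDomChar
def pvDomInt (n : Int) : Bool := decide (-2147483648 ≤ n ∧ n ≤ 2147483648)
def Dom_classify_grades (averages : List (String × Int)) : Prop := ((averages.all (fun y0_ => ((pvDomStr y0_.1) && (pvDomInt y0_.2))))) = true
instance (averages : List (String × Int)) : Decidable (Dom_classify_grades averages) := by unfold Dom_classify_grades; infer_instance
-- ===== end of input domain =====

-- B replaces A's if/elif chain with a sorted threshold table searched by a hand-rolled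
-- bisect_right binary search (alternative structure, same cost).


-- ===== PORT A =====
-- for name, avg in averages.items(): if/elif chain; classified[name] = (avg, grade)
def classify_grades (averages : List (String × Int)) : List (String × Int × String) :=
  (averages.foldl
    (fun (classified : PySem.Dict String (Int × String)) p =>
      classified.insert p.1
        (p.2, if p.2 ≥ 90 then "A" else if p.2 ≥ 75 then "B" else if p.2 ≥ 60 then "C" else "F"))
    PySem.Dict.empty).items

-- ===== PORT B =====
-- the while loop of _bisect_right, ported with fuel = hi - lo at entry (the interval shrinks
-- by at least 1 per iteration, so the fuel is never exhausted); table[mid] is in range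
-- whenever lo < hi ≤ len(table), so getD's default is never read
def bisectLoopB (table : List Int) (x : Int) : Nat → Nat → Nat → Nat
  | 0, lo, _ => lo
  | fuel + 1, lo, hi =>
    if lo < hi then
      if x < table.getD ((lo + hi) / 2) 0 then bisectLoopB table x fuel lo ((lo + hi) / 2)
      else bisectLoopB table x fuel (((lo + hi) / 2) + 1) hi
    else lo

def bisectRightB (table : List Int) (x : Int) : Nat :=
  bisectLoopB table x table.length 0 table.length

def classify_grades_alt (averages : List (String × Int)) : List (String × Int × String) :=
  (averages.foldl
    (fun (classified : PySem.Dict String (Int × String)) p =>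
      classified.insert p.1
        (p.2, (["F", "C", "B", "A"].getD (bisectRightB [60, 75, 90] p.2) "")))
    PySem.Dict.empty).items

-- ===== PRECONDITION & SPEC =====
def Spec_classify_grades (averages : List (String × Int)) (out : List (String × Int × String)) : Prop := out = classify_grades_alt averages
instance (averages : List (String × Int)) (out : List (String × Int × String)) : Decidable (Spec_classify_grades averages out) := by unfold Spec_classify_grades; infer_instance

-- ===== CLAIM (what is proved, stated in full; the proofs are below) =====
def Claim_equal_classify_grades : Prop := ∀ (averages : List (String × Int)), Dom_classify_grades averages → Spec_classify_grades averages (classify_grades averages)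

-- ===== LEMMAS AND PROOFS =====

-- the per-entry grade computed by the table lookup equals A's comparison chain
theorem grade_point (avg : Int) :
    (if avg ≥ 90 then "A" else if avg ≥ 75 then "B" else if avg ≥ 60 then "C" else "F")
      = (["F", "C", "B", "A"].getD (bisectRightB [60, 75, 90] avg) "") := by
  simp only [bisectRightB, bisectLoopB, List.length]
  norm_num
  split_ifs <;> simp_all <;> omega

-- ===== VERDICT (by name: the statement is the Claim_ definition above) =====
theorem classify_grades_spec : Claim_equal_classify_grades := by
  intro averages _
  unfold Spec_classify_grades classify_grades classify_grades_alt
  simp only [grade_point]
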